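-- pv_equiv track=rewrite | github.com/fyd6200312/agent-demo-dev | agent_loop_reference.py | truncate_long_lines
-- ===== SOURCE A (Python) =====
-- MAX_LINE_CHARS = 2000           # Max chars per line
--
-- def truncate_long_lines(content: str, max_chars: int = MAX_LINE_CHARS) -> str:
--     """Truncate individual long lines."""
--     lines = content.split('\n')
--     result = []
--     for line in lines:
--         if len(line) > max_chars:
--             result.append(line[:max_chars] + "... [line truncated]")
--         else:
--             result.append(line)
--     return '\n'.join(result)
-- ===== SOURCE B (Python) =====
-- MAX_LINE_CHARS = 2000           # Max chars per line
--
--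
-- def truncate_long_lines(content: str, max_chars: int = MAX_LINE_CHARS) -> str:
--     # Streaming character automaton: one pass over the characters with a
--     # per-line counter; no lines list is built and no slicing is done.
--     out = []
--     k = 0  # number of characters seen on the current line
--     for c in content:
--         if c == '\n':
--             if k > max_chars:
--                 out.append("... [line truncated]")
--             out.append('\n')
--             k = 0
--         else:
--             if k < max_chars:
--                 out.append(c)
--             k += 1
--     if k > max_chars:
--         out.append("... [line truncated]")
--     return ''.join(out)
-- ===== Notes on version B (the rewrite author's own statement) =====
-- stated objective: alternative
-- what changed: Replaces the split-into-lines / per-line slice loop / join pipeline by a single character-level streaming automaton with a per-line counter: each character is emitted or dropped on the fly and the marker is flushed at each newline/end, with no lines list and no slicing.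
-- outside the precondition, e.g. on truncate_long_lines('ab', -1): A returns 'a... [line truncated]', B returns '... [line truncated]'
import Mathlib
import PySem

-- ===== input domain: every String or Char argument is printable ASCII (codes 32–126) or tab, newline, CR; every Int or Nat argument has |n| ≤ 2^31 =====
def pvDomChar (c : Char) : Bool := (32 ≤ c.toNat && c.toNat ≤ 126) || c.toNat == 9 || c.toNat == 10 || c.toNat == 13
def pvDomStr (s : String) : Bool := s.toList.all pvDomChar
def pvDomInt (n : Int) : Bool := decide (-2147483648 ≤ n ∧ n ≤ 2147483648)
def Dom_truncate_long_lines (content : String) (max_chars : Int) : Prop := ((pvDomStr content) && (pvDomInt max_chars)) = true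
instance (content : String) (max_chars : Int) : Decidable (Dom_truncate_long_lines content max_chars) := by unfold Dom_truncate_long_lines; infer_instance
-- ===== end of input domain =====

-- B replaces A's split-into-lines / per-line slice loop / '\n'.join pipeline by a single
-- character-level streaming automaton with a per-line counter (objective: alternative).

-- ===== PORT A =====
-- A: lines = content.split('\n'); loop appending processed lines; '\n'.join(result)
def truncate_long_lines (content : String) (max_chars : Int) : String :=
  let lines := PySem.Chars.splitOn content.toList ['\n']
  let result := lines.foldl (fun acc line =>
    acc ++ [if max_chars < (line.length : Int) then
              PySem.List.slice line none (some max_chars) ++ "... [line truncated]".toList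
            else line]) []
  String.ofList (PySem.Chars.join ['\n'] result)

-- ===== PORT B =====
-- B's for-loop over the characters, carrying the per-line counter k; the pieces appended
-- to `out` in Source B appear here in return position (emitted char / marker / newline).
def pvStream (max_chars : Int) : List Char → Int → List Char
  | [], k => if max_chars < k then "... [line truncated]".toList else []
  | c :: cs, k =>
    if c = '\n' then
      (if max_chars < k then "... [line truncated]".toList else []) ++ '\n' :: pvStream max_chars cs 0
    else
      (if k < max_chars then [c] else []) ++ pvStream max_chars cs (k + 1)

def truncate_long_lines_alt (content : String) (max_chars : Int) : String :=
  String.ofList (pvStream max_chars content.toList 0)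

-- ===== PRECONDITION & SPEC =====
-- Pre_ excludes negative max_chars, on which A still returns a value: a negative limit is
-- outside the natural domain of a line-length cap, and A's behaviour there (keeping all but
-- the last |max_chars| characters via Python's negative-slice rule) is an artefact of
-- line[:max_chars]; B's automaton keeps no characters there.
def Pre_truncate_long_lines (content : String) (max_chars : Int) : Prop := 0 ≤ max_chars
instance (content : String) (max_chars : Int) : Decidable (Pre_truncate_long_lines content max_chars) := by unfold Pre_truncate_long_lines; infer_instance

def pvWitness_truncate_long_lines : String × Int := ("ab\ncd", 1)

def Spec_truncate_long_lines (content : String) (max_chars : Int) (out : String) : Prop := out = truncate_long_lines_alt content max_chars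
instance (content : String) (max_chars : Int) (out : String) : Decidable (Spec_truncate_long_lines content max_chars out) := by unfold Spec_truncate_long_lines; infer_instance

-- ===== CLAIM (what is proved, stated in full; the proofs are below) =====
def Claim_equal_truncate_long_lines : Prop := ∀ (content : String) (max_chars : Int), Dom_truncate_long_lines content max_chars → Pre_truncate_long_lines content max_chars → Spec_truncate_long_lines content max_chars (truncate_long_lines content max_chars)

-- ===== LEMMAS AND PROOFS =====

-- simple structural recursion describing split on a single '\n'
def pvSplitNl : List Char → List (List Char)
  | [] => [[]]
  | c :: rest =>
    if c = '\n' then [] :: pvSplitNl rest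
    else
      match pvSplitNl rest with
      | [] => [[c]]
      | l :: ls => (c :: l) :: ls

def pvConsApp (p : List Char) : List (List Char) → List (List Char)
  | [] => [p]
  | x :: xs => (p ++ x) :: xs

theorem pvSplitNl_ne_nil (cs : List Char) : pvSplitNl cs ≠ [] := by
  cases cs with
  | nil => simp [pvSplitNl]
  | cons c rest =>
    simp only [pvSplitNl]
    split
    · simp
    · split <;> simp

theorem pvConsApp_nil {xs : List (List Char)} (h : xs ≠ []) : pvConsApp [] xs = xs := by
  cases xs with
  | nil => exact absurd rfl h
  | cons x xs => simp [pvConsApp]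

theorem pvGo_eq (fuel : Nat) : ∀ (l cur : List Char) (acc : List (List Char)),
    l.length < fuel →
    PySem.Chars.splitOn.go ['\n'] fuel l cur acc = acc.reverse ++ pvConsApp cur.reverse (pvSplitNl l) := by
  induction fuel with
  | zero => intro l cur acc h; omega
  | succ n ih =>
    intro l cur acc h
    cases l with
    | nil =>
      simp [PySem.Chars.splitOn.go, pvSplitNl, pvConsApp]
    | cons c rest =>
      have hstep : PySem.Chars.splitOn.go ['\n'] (n+1) (c :: rest) cur acc =
          if List.isPrefixOf ['\n'] (c :: rest) then
            PySem.Chars.splitOn.go ['\n'] n rest [] (cur.reverse :: acc)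
          else PySem.Chars.splitOn.go ['\n'] n rest (c :: cur) acc := by
        rw [PySem.Chars.splitOn.go]; simp
      have hlen : rest.length < n := by simp at h; omega
      rw [hstep]
      by_cases hc : c = '\n'
      · subst hc
        rw [if_pos (by simp [List.isPrefixOf])]
        rw [ih rest [] _ hlen]
        cases hrest : pvSplitNl rest with
        | nil => exact absurd hrest (pvSplitNl_ne_nil rest)
        | cons x xs => simp [pvSplitNl, hrest, pvConsApp]
      · rw [if_neg (by simp [List.isPrefixOf]; exact fun h' => hc h'.symm)]
        rw [ih rest (c :: cur) acc hlen]
        cases hrest : pvSplitNl rest with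
        | nil => exact absurd hrest (pvSplitNl_ne_nil rest)
        | cons l ls =>
          simp [pvSplitNl, hc, hrest, pvConsApp]

theorem pvSplitOn_eq (cs : List Char) : PySem.Chars.splitOn cs ['\n'] = pvSplitNl cs := by
  unfold PySem.Chars.splitOn
  rw [pvGo_eq (cs.length + 1) cs [] [] (by omega)]
  simp [pvConsApp_nil (pvSplitNl_ne_nil cs)]

theorem pvSplitNl_eq (cs : List Char) :
    pvSplitNl cs =
      match cs.dropWhile (fun c => c ≠ '\n') with
      | [] => [cs.takeWhile (fun c => c ≠ '\n')]
      | _ :: rs => cs.takeWhile (fun c => c ≠ '\n') :: pvSplitNl rs := by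
  induction cs with
  | nil => simp [pvSplitNl]
  | cons c rest ih =>
    by_cases hc : c = '\n'
    · subst hc
      simp [pvSplitNl, List.dropWhile, List.takeWhile]
    · simp only [pvSplitNl, List.takeWhile_cons, List.dropWhile_cons, hc, ne_eq, not_false_eq_true, decide_true, if_true]
      rw [ih]
      cases hd : rest.dropWhile (fun c => c ≠ '\n') <;> simp

-- what B emits for one newline-free segment, plus the end-of-line marker decision
def pvBcut (m : Int) (l : List Char) : List Char :=
  l.take m.toNat ++ (if m < (l.length : Int) then "... [line truncated]".toList else [])

theorem pvStream_seg (m : Int) (t : List Char) (ht : ∀ c ∈ t, c ≠ '\n') :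
    ∀ (rest : List Char) (k : Int),
    pvStream m (t ++ rest) k = t.take (m - k).toNat ++ pvStream m rest (k + t.length) := by
  induction t with
  | nil => intro rest k; simp
  | cons c t ih =>
    intro rest k
    have hc : c ≠ '\n' := ht c (by simp)
    have ht' : ∀ c ∈ t, c ≠ '\n' := fun d hd => ht d (by simp [hd])
    simp only [List.cons_append, pvStream, if_neg hc]
    rw [ih ht' rest (k + 1)]
    have harith : k + 1 + (t.length : Int) = k + ((c :: t).length : Int) := by
      simp; omega
    rw [harith]
    by_cases hk : k < m
    · have h1 : (m - k).toNat = (m - (k + 1)).toNat + 1 := by omega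
      rw [h1, if_pos hk]
      simp
    · have h1 : (m - k).toNat = 0 := by omega
      have h2 : (m - (k + 1)).toNat = 0 := by omega
      simp [h1, h2, if_neg hk]

theorem pvStream_eq (m : Int) : ∀ (cs : List Char),
    pvStream m cs 0 = PySem.Chars.join ['\n'] ((pvSplitNl cs).map (pvBcut m)) := by
  intro cs
  induction hn : cs.length using Nat.strong_induction_on generalizing cs with
  | _ n ih =>
    subst hn
    have hsplit := (List.takeWhile_append_dropWhile (p := fun c => decide (c ≠ '\n')) (l := cs)).symm
    have ht : ∀ c ∈ cs.takeWhile (fun c => decide (c ≠ '\n')), c ≠ '\n' := by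
      intro c hcmem
      have := List.mem_takeWhile_imp hcmem
      simpa using this
    rw [pvSplitNl_eq]
    cases hd : cs.dropWhile (fun c => decide (c ≠ '\n')) with
    | nil =>
      rw [hd] at hsplit
      conv_lhs => rw [hsplit]
      rw [pvStream_seg m _ ht [] 0]
      simp [pvStream, pvBcut, PySem.Chars.join_singleton]
    | cons d rs =>
      have hdnl : d = '\n' := by
        have := List.head?_dropWhile_not (p := fun c => decide (c ≠ '\n')) (l := cs)
        rw [hd] at this
        simpa using this
      subst hdnl
      conv_lhs => rw [hsplit, hd]
      rw [pvStream_seg m _ ht _ 0]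
      simp only [pvStream]
      have hlen : rs.length < cs.length := by
        conv_rhs => rw [hsplit, hd]
        simp only [List.length_append, List.length_cons]
        omega
      rw [ih rs.length hlen rs rfl]
      cases hrs : pvSplitNl rs with
      | nil => exact absurd hrs (pvSplitNl_ne_nil rs)
      | cons b l =>
        rw [hrs] at *
        simp [PySem.Chars.join_cons_cons, pvBcut]

theorem pvCut_eq (m : Int) (hm : 0 ≤ m) (l : List Char) :
    (if m < (l.length : Int) then
        PySem.List.slice l none (some m) ++ "... [line truncated]".toList
      else l) = pvBcut m l := by
  unfold pvBcut
  by_cases h : m < (l.length : Int)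
  · rw [if_pos h, if_pos h, PySem.List.slice_to l hm]
  · rw [if_neg h, if_neg h]
    have : l.length ≤ m.toNat := by omega
    simp [List.take_of_length_le this]

-- ===== VERDICT (by name: the statement is the Claim_ definition above) =====
theorem truncate_long_lines_spec : Claim_equal_truncate_long_lines := by
  intro content max_chars _ hpre
  unfold Spec_truncate_long_lines truncate_long_lines truncate_long_lines_alt
  simp only [pvSplitOn_eq, PySem.List.foldl_append_singleton_eq_map, List.nil_append,
    pvStream_eq]
  congr 2
  exact List.map_congr_left (fun l _ => pvCut_eq max_chars hpre l)
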